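-- pv_equiv track=rewrite | github.com/rowan-machine/v0agent | src/app/agents/dikw_synthesizer.py | build_graph_data
-- ===== SOURCE A (Python) =====
-- from typing import Any, Dict, List, Optional, Tuple
--
-- DIKW_LEVELS = ['data', 'information', 'knowledge', 'wisdom']
--
-- def build_graph_data(items: List[Dict]) -> Tuple[List[Dict], List[Dict]]:
--     """Build nodes and links for force-directed graph visualization."""
--     nodes = [{"id": "root", "name": "Knowledge", "type": "root", "level": "root"}]
--     links = []
--
--     # Group by level
--     levels = {level: [] for level in DIKW_LEVELS}
--     for item in items:
--         level = item.get('level', 'data')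
--         if level in levels:
--             levels[level].append(item)
--
--     for level in DIKW_LEVELS:
--         level_id = f"level_{level}"
--         nodes.append({
--             "id": level_id,
--             "name": level.capitalize(),
--             "type": "level",
--             "level": level
--         })
--         links.append({"source": "root", "target": level_id})
--
--         for item in levels[level][:15]:
--             item_id = f"item_{item.get('id')}"
--             content = item.get('content', '')
--             nodes.append({
--                 "id": item_id,
--                 "name": content[:30] + ('...' if len(content) > 30 else ''),
--                 "type": "item",
--                 "level": level,
--                 "summary": item.get('summary', '')
--             })
--             links.append({"source": level_id, "target": item_id})
--
--     return nodes, links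
-- ===== SOURCE B (Python) =====
-- from typing import Any, Dict, List, Optional, Tuple
--
-- DIKW_LEVELS = ['data', 'information', 'knowledge', 'wisdom']
--
-- def build_graph_data(items: List[Dict]) -> Tuple[List[Dict], List[Dict]]:
--     """Build nodes and links for force-directed graph visualization.
--
--     No grouping index: each level rescans `items` inline and the per-level
--     node/link segments are built with comprehensions and concatenated."""
--     nodes = [{"id": "root", "name": "Knowledge", "type": "root", "level": "root"}]
--     links = []
--     for level in DIKW_LEVELS:
--         level_id = f"level_{level}"
--         matching = [it for it in items if it.get('level', 'data') == level][:15]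
--         nodes += [{"id": level_id, "name": level.capitalize(),
--                    "type": "level", "level": level}] + \
--                  [{"id": f"item_{it.get('id')}",
--                    "name": it.get('content', '')[:30] + ('...' if len(it.get('content', '')) > 30 else ''),
--                    "type": "item", "level": level,
--                    "summary": it.get('summary', '')} for it in matching]
--         links += [{"source": "root", "target": level_id}] + \
--                  [{"source": level_id, "target": f"item_{it.get('id')}"} for it in matching]
--     return nodes, links
-- ===== Notes on version B (the rewrite author's own statement) =====
-- stated objective: simpler
-- what changed: Drops the levels-grouping dict entirely: per DIKW level B rescans items with an inline filtered comprehension and builds the level's node/link segments as list comprehensions concatenated onto the result, instead of A's pre-built bucket index read back inside nested append loops.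
import Mathlib
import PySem

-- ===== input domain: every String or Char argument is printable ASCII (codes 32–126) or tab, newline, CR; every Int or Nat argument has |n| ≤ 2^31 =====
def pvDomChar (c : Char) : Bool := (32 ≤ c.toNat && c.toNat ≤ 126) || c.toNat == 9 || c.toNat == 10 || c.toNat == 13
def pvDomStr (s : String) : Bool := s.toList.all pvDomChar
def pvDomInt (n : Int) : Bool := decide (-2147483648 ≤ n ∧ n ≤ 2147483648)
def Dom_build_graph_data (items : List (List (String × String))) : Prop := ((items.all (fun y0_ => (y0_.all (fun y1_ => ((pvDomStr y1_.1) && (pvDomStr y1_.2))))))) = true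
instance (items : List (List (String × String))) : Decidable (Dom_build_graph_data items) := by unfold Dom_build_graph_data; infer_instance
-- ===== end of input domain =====

-- B drops A's levels-grouping dict: it rescans `items` per DIKW level with an inline
-- filter and concatenates per-level comprehension segments (objective: simpler).


-- ===== PORT A =====
-- module constant and Python library functions shared by both sources
def DIKW_LEVELS : List String := ["data", "information", "knowledge", "wisdom"]

/-- `d.get(k)` on a Python dict represented as an association list (first match). -/
def pyGet (d : List (String × String)) (k : String) : Option String :=
  (d.find? (fun p => p.1 == k)).map (·.2)

/-- `d.get(k, dflt)`. -/
def pyGetD (d : List (String × String)) (k dflt : String) : String :=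
  (pyGet d k).getD dflt

/-- f-string interpolation of `item.get('id')`: `None` prints as `"None"`. -/
def pyStrOpt : Option String → String
  | some s => s
  | none => "None"

/-- `str.capitalize()`, exact on the ASCII domain. -/
def pyCapitalize (s : String) : String :=
  match s.toList with
  | [] => ""
  | c :: rest => String.mk (PySem.Chars.upper [c] ++ PySem.Chars.lower rest)

def build_graph_data (items : List (List (String × String))) :
    (List (List (String × String))) × (List (List (String × String))) :=
  let nodes : List (List (String × String)) :=
    [[("id", "root"), ("name", "Knowledge"), ("type", "root"), ("level", "root")]]
  let links : List (List (String × String)) := []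
  -- levels = {level: [] for level in DIKW_LEVELS}
  let levels0 : PySem.Dict String (List (List (String × String))) :=
    DIKW_LEVELS.foldl (fun d level => d.insert level []) PySem.Dict.empty
  -- for item in items: group by level
  let levels := items.foldl (fun d item =>
    let level := pyGetD item "level" "data"
    if d.contains level then d.modify level [] (fun b => b ++ [item]) else d) levels0
  -- for level in DIKW_LEVELS: emit level node/link and its bucket's first 15 items
  DIKW_LEVELS.foldl
    (fun (acc : (List (List (String × String))) × (List (List (String × String)))) level =>
      let level_id := "level_" ++ level
      let nodes1 := acc.1 ++
        [[("id", level_id), ("name", pyCapitalize level), ("type", "level"), ("level", level)]]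
      let links1 := acc.2 ++ [[("source", "root"), ("target", level_id)]]
      -- levels[level][:15]  (the key is always present: levels was seeded with all DIKW keys)
      (PySem.List.slice (levels.getD level []) none (some 15)).foldl
        (fun acc2 item =>
          let item_id := "item_" ++ pyStrOpt (pyGet item "id")
          let content := pyGetD item "content" ""
          (acc2.1 ++
            [[("id", item_id),
              ("name", PySem.Str.slice content none (some 30) ++
                 (if PySem.Str.len content > 30 then "..." else "")),
              ("type", "item"), ("level", level), ("summary", pyGetD item "summary" "")]],
           acc2.2 ++ [[("source", level_id), ("target", item_id)]]))
        (nodes1, links1))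
    (nodes, links)

-- ===== PORT B =====
def build_graph_data_alt (items : List (List (String × String))) :
    (List (List (String × String))) × (List (List (String × String))) :=
  DIKW_LEVELS.foldl
    (fun (acc : (List (List (String × String))) × (List (List (String × String)))) level =>
      let level_id := "level_" ++ level
      -- matching = [it for it in items if it.get('level','data') == level][:15]
      let matching := PySem.List.slice
        (items.filter (fun it => pyGetD it "level" "data" == level)) none (some 15)
      (acc.1 ++
         [[("id", level_id), ("name", pyCapitalize level), ("type", "level"), ("level", level)]] ++
         matching.map (fun it =>
           [("id", "item_" ++ pyStrOpt (pyGet it "id")),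
            ("name", PySem.Str.slice (pyGetD it "content" "") none (some 30) ++
               (if PySem.Str.len (pyGetD it "content" "") > 30 then "..." else "")),
            ("type", "item"), ("level", level), ("summary", pyGetD it "summary" "")]),
       acc.2 ++
         [[("source", "root"), ("target", level_id)]] ++
         matching.map (fun it =>
           [("source", level_id), ("target", "item_" ++ pyStrOpt (pyGet it "id"))])))
    ([[("id", "root"), ("name", "Knowledge"), ("type", "root"), ("level", "root")]], [])

-- ===== PRECONDITION & SPEC =====
def Spec_build_graph_data (items : List (List (String × String))) (out : (List (List (String × String))) × (List (List (String × String)))) : Prop := out = build_graph_data_alt items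
instance (items : List (List (String × String))) (out : (List (List (String × String))) × (List (List (String × String)))) : Decidable (Spec_build_graph_data items out) := by unfold Spec_build_graph_data; infer_instance

-- ===== CLAIM (what is proved, stated in full; the proofs are below) =====
def Claim_equal_build_graph_data : Prop := ∀ (items : List (List (String × String))), Dom_build_graph_data items → Spec_build_graph_data items (build_graph_data items)

-- ===== LEMMAS AND PROOFS =====

/-- The bucket of key `l` after A's grouping pass is the order-preserving filter
of the items whose (defaulted) level equals `l`, provided `l` is already a key. -/
lemma bucket_getD (its : List (List (String × String)))
    (d : PySem.Dict String (List (List (String × String)))) (l : String)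
    (h : d.contains l = true) :
    (its.foldl (fun d item =>
        let level := pyGetD item "level" "data"
        if d.contains level then d.modify level [] (fun b => b ++ [item]) else d) d).getD l []
      = d.getD l [] ++ its.filter (fun it => pyGetD it "level" "data" == l) := by
  induction its generalizing d with
  | nil => simp
  | cons it rest ih =>
    simp only [List.foldl_cons, List.filter_cons]
    by_cases hc : d.contains (pyGetD it "level" "data")
    · simp only [hc, if_true]
      rw [ih _ (by rw [PySem.Dict.contains_modify]; simp [h])]
      rw [PySem.Dict.getD_modify]
      by_cases he : pyGetD it "level" "data" = l
      · simp [he, List.append_assoc]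
      · have h2 : ¬ l = pyGetD it "level" "data" := fun hh => he hh.symm
        simp [he, h2]
    · simp only [hc, Bool.false_eq_true, if_false]
      have hne : (pyGetD it "level" "data" == l) = false := by
        by_cases he : pyGetD it "level" "data" = l
        · exact absurd (he ▸ h) hc
        · simp [he]
      rw [ih _ h, hne]
      simp

/-- A fold that appends one node and one link per element equals the pair of maps. -/
lemma foldl_pair_append {α γ δ : Type} (f : α → γ) (g : α → δ) (xs : List α)
    (p : List γ × List δ) :
    xs.foldl (fun a x => (a.1 ++ [f x], a.2 ++ [g x])) p = (p.1 ++ xs.map f, p.2 ++ xs.map g) := by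
  induction xs generalizing p with
  | nil => simp
  | cons x rest ih => simp [ih, List.append_assoc]

-- ===== VERDICT (by name: the statement is the Claim_ definition above) =====
theorem build_graph_data_spec : Claim_equal_build_graph_data := by
  intro items _
  unfold Spec_build_graph_data build_graph_data build_graph_data_alt
  refine PySem.List.foldl_congr_mem _ _ _ _ ?_
  intro acc level hmem
  have hstep : ∀ l : String, l ∈ DIKW_LEVELS →
      (items.foldl (fun d item =>
        let level := pyGetD item "level" "data"
        if d.contains level then d.modify level [] (fun b => b ++ [item]) else d)
        (DIKW_LEVELS.foldl (fun d level => d.insert level []) PySem.Dict.empty)).getD l []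
      = items.filter (fun it => pyGetD it "level" "data" == l) := by
    intro l hl
    fin_cases hl <;>
      · rw [bucket_getD _ _ _ (by decide)]
        rfl
  rw [hstep level hmem]
  simp only [foldl_pair_append, List.append_assoc]
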